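-- pv_equiv track=rewrite | github.com/Whem/lotteryGuesser | src/LotteryGuesserDjango/processors/ultimate_hybrid_prediction.py | _gap_method
-- ===== SOURCE A (Python) =====
-- def _gap_method(data, min_num, max_num, count):
--     last_seen = {}
--     for i, draw in enumerate(data):
--         for num in draw:
--             if min_num <= num <= max_num:
--                 last_seen[num] = i
--
--     gaps = {}
--     for num in range(min_num, max_num + 1):
--         gaps[num] = last_seen.get(num, len(data))
--
--     return sorted(gaps.keys(), key=lambda x: gaps[x], reverse=True)[:count]
-- ===== SOURCE B (Python) =====
-- def _gap_method(data, min_num, max_num, count):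
--     n = len(data)
--     last_seen = {}
--     for i, draw in enumerate(data):
--         for num in draw:
--             if min_num <= num <= max_num:
--                 last_seen[num] = i
--     # bucket (counting) sort on the last-seen index instead of a comparison sort
--     buckets = [[] for _ in range(n + 1)]
--     for num in range(min_num, max_num + 1):
--         buckets[last_seen.get(num, n)].append(num)
--     ordered = []
--     for k in range(n, -1, -1):
--         ordered.extend(buckets[k])
--     return ordered[:count]
-- ===== Notes on version B (the rewrite author's own statement) =====
-- stated objective: alternative
-- what changed: Replaces the comparison sort keyed on last-seen index by a counting/bucket pass: numbers are appended (in ascending order) to a bucket per last-seen index and the buckets are concatenated from index len(data) down to 0, which reproduces the stable descending order without sorting.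
import Mathlib
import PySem

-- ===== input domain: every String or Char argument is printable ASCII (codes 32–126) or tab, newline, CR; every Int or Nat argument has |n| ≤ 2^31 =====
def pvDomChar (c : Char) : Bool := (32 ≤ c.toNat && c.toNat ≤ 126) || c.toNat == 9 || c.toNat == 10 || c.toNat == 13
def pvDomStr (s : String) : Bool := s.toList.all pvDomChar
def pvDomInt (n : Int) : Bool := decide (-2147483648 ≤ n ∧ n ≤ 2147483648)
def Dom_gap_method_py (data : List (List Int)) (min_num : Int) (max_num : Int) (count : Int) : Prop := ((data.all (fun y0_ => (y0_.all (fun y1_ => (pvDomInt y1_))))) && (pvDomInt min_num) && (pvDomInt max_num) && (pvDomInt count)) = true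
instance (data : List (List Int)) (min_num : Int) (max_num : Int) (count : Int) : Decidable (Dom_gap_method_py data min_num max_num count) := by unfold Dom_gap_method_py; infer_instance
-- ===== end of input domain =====

-- B replaces A's comparison sort on the last-seen index by a counting/bucket pass over the index values.

-- ===== PORT A =====
-- (in A, `gaps[x]` is looked up only at keys of `gaps`, so the lookup always succeeds; ported as getD with an unused default 0)
def gap_method_py (data : List (List Int)) (min_num : Int) (max_num : Int) (count : Int) : List Int :=
  let last_seen : PySem.Dict Int Int :=
    (PySem.List.enumerate data 0).foldl (fun d p =>
      p.2.foldl (fun d num => if min_num ≤ num ∧ num ≤ max_num then d.insert num p.1 else d) d)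
      PySem.Dict.empty
  let gaps : PySem.Dict Int Int :=
    (PySem.List.pyRange min_num (max_num + 1) 1).foldl
      (fun g num => g.insert num (last_seen.getD num (data.length : Int))) PySem.Dict.empty
  -- sorted(keys, key=lambda x: gaps[x], reverse=True): Python's sorted calls the key function
  -- exactly once per element (documented), so the lookup is done once per key, as in CPython
  PySem.List.slice
    ((PySem.List.sorted ((PySem.Dict.keys gaps).map (fun x => (gaps.getD x 0, x)))
        (fun p => p.1) true).map (fun p => p.2))
    none (some count)

-- ===== PORT B =====
def gap_method_py_alt (data : List (List Int)) (min_num : Int) (max_num : Int) (count : Int) : List Int :=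
  let last_seen : PySem.Dict Int Int :=
    (PySem.List.enumerate data 0).foldl (fun d p =>
      p.2.foldl (fun d num => if min_num ≤ num ∧ num ≤ max_num then d.insert num p.1 else d) d)
      PySem.Dict.empty
  let buckets : List (List Int) :=
    (PySem.List.pyRange min_num (max_num + 1) 1).foldl
      (fun bs num =>
        PySem.List.pySetD bs (last_seen.getD num (data.length : Int))
          (PySem.List.pyGetD bs (last_seen.getD num (data.length : Int)) [] ++ [num]))
      (List.replicate (data.length + 1) [])
  let ordered : List Int :=
    (PySem.List.pyRange (data.length : Int) (-1) (-1)).foldl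
      (fun acc k => acc ++ PySem.List.pyGetD buckets k []) []
  PySem.List.slice ordered none (some count)

-- ===== PRECONDITION & SPEC =====
def Spec_gap_method_py (data : List (List Int)) (min_num : Int) (max_num : Int) (count : Int) (out : List Int) : Prop := out = gap_method_py_alt data min_num max_num count
instance (data : List (List Int)) (min_num : Int) (max_num : Int) (count : Int) (out : List Int) : Decidable (Spec_gap_method_py data min_num max_num count out) := by unfold Spec_gap_method_py; infer_instance

-- ===== CLAIM (what is proved, stated in full; the proofs are below) =====
def Claim_equal_gap_method_py : Prop := ∀ (data : List (List Int)) (min_num : Int) (max_num : Int) (count : Int), Dom_gap_method_py data min_num max_num count → Spec_gap_method_py data min_num max_num count (gap_method_py data min_num max_num count)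

-- ===== LEMMAS AND PROOFS =====

-- the shared last_seen dictionary, named for the proofs
def pvLS (data : List (List Int)) (min_num max_num : Int) : PySem.Dict Int Int :=
  (PySem.List.enumerate data 0).foldl (fun d p =>
    p.2.foldl (fun d num => if min_num ≤ num ∧ num ≤ max_num then d.insert num p.1 else d) d)
    PySem.Dict.empty

-- every getD (with default n) out of a dict built from values in [0, n) stays in [0, n]
lemma pvLS_getD_bounds (data : List (List Int)) (min_num max_num : Int) (k : Int) :
    0 ≤ (pvLS data min_num max_num).getD k (data.length : Int) ∧
      (pvLS data min_num max_num).getD k (data.length : Int) ≤ (data.length : Int) := by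
  unfold pvLS
  have main : ∀ (ps : List (Int × List Int)) (d : PySem.Dict Int Int),
      (∀ p ∈ ps, 0 ≤ p.1 ∧ p.1 < (data.length : Int)) →
      (∀ j, 0 ≤ d.getD j (data.length : Int) ∧ d.getD j (data.length : Int) ≤ (data.length : Int)) →
      ∀ j, 0 ≤ (ps.foldl (fun d p =>
            p.2.foldl (fun d num => if min_num ≤ num ∧ num ≤ max_num then d.insert num p.1 else d) d) d).getD j (data.length : Int) ∧
          (ps.foldl (fun d p =>
            p.2.foldl (fun d num => if min_num ≤ num ∧ num ≤ max_num then d.insert num p.1 else d) d) d).getD j (data.length : Int) ≤ (data.length : Int) := by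
    intro ps
    induction ps with
    | nil => intro d _ hd j; exact hd j
    | cons p ps ih =>
      intro d hps hd j
      simp only [List.foldl_cons]
      refine ih _ (fun q hq => hps q (List.mem_cons_of_mem _ hq)) ?_ j
      have hp := hps p (List.mem_cons_self)
      have inner : ∀ (l : List Int) (d : PySem.Dict Int Int),
          (∀ j, 0 ≤ d.getD j (data.length : Int) ∧ d.getD j (data.length : Int) ≤ (data.length : Int)) →
          ∀ j, 0 ≤ (l.foldl (fun d num => if min_num ≤ num ∧ num ≤ max_num then d.insert num p.1 else d) d).getD j (data.length : Int) ∧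
            (l.foldl (fun d num => if min_num ≤ num ∧ num ≤ max_num then d.insert num p.1 else d) d).getD j (data.length : Int) ≤ (data.length : Int) := by
        intro l
        induction l with
        | nil => intro d hd j; exact hd j
        | cons x l ihl =>
          intro d hd j
          simp only [List.foldl_cons]
          refine ihl _ ?_ j
          intro i
          split_ifs with hx
          · rw [PySem.Dict.getD_insert]
            split_ifs with hi
            · exact ⟨hp.1, le_of_lt hp.2⟩
            · exact hd i
          · exact hd i
      exact inner p.2 d hd
  refine main _ _ ?_ ?_ k
  · intro p hp
    rcases (PySem.List.mem_enumerate_iff data 0 p).1 hp with ⟨i, hi, rfl⟩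
    constructor <;> simp [hi]
  · intro j
    have hn : (0 : Int) ≤ (data.length : Int) := by positivity
    simp [PySem.Dict.getD_empty, hn]

-- insertBy lands exactly between a no-before prefix and a before-head suffix
lemma pv_insertBy_middle {α : Type} (before : α → α → Bool) (x : α) :
    ∀ (as bs : List α), (∀ a ∈ as, before x a = false) →
      (∀ b, bs.head? = some b → before x b = true) →
      PySem.List.insertBy before x (as ++ bs) = as ++ x :: bs := by
  intro as
  induction as with
  | nil =>
    intro bs _ hb
    cases bs with
    | nil => simp [PySem.List.insertBy]
    | cons b t => simp [PySem.List.insertBy, hb b rfl]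
  | cons a as ih =>
    intro bs ha hb
    have hfa : before x a = false := ha a List.mem_cons_self
    simp only [List.cons_append, PySem.List.insertBy, hfa]
    simp only [Bool.false_eq_true, if_false]
    rw [ih bs (fun a' ha' => ha a' (List.mem_cons_of_mem _ ha')) hb]

-- stable reverse insertion sort = concatenation of key-buckets in descending key order
lemma pv_sorted_rev_eq_flatMap {α : Type} (key : α → Int) (vals : List Int)
    (hv : vals.Pairwise (fun a b => b < a)) :
    ∀ (l m : List α), (∀ x ∈ l, key x ∈ vals) →
      l.foldl (fun acc x => PySem.List.insertBy (fun a b => decide (key b < key a)) x acc)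
        (vals.flatMap (fun v => m.filter (fun x => key x == v)))
      = vals.flatMap (fun v => (m ++ l).filter (fun x => key x == v)) := by
  intro l
  induction l with
  | nil => intro m _; simp
  | cons x l ih =>
    intro m hc
    simp only [List.foldl_cons]
    have hx : key x ∈ vals := hc x List.mem_cons_self
    rcases List.append_of_mem hx with ⟨hi, lo, hsplit⟩
    have hhi : ∀ w ∈ hi, key x < w := by
      intro w hw
      have := (List.pairwise_append.1 (hsplit ▸ hv)).2.2 w hw (key x) List.mem_cons_self
      exact this
    have hlo : ∀ w ∈ lo, w < key x := by
      have := List.pairwise_cons.1 (List.pairwise_append.1 (hsplit ▸ hv)).2.1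
      exact this.1
    have step : PySem.List.insertBy (fun a b => decide (key b < key a)) x
        (vals.flatMap (fun v => m.filter (fun x => key x == v)))
        = vals.flatMap (fun v => (m ++ [x]).filter (fun x => key x == v)) := by
      rw [hsplit]
      simp only [List.flatMap_append, List.flatMap_cons]
      rw [← List.append_assoc, ← List.append_assoc]
      rw [pv_insertBy_middle]
      · have hfx : (m ++ [x]).filter (fun y => key y == key x)
            = m.filter (fun y => key y == key x) ++ [x] := by
          simp [List.filter_append]
        have hother : ∀ w, w ≠ key x →
            (m ++ [x]).filter (fun y => key y == w) = m.filter (fun y => key y == w) := by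
          intro w hw
          simp [List.filter_append, Ne.symm hw]
        rw [List.flatMap_congr (l := hi) (f := fun v => m.filter (fun y => key y == v))
              (g := fun v => (m ++ [x]).filter (fun y => key y == v))
              (fun w hw => (hother w (by have := hhi w hw; omega)).symm),
            List.flatMap_congr (l := lo) (f := fun v => m.filter (fun y => key y == v))
              (g := fun v => (m ++ [x]).filter (fun y => key y == v))
              (fun w hw => (hother w (by have := hlo w hw; omega)).symm),
            hfx]
        simp
      · intro a ha
        rcases List.mem_append.1 ha with ha | ha
        · rcases List.mem_flatMap.1 ha with ⟨w, hw, hmem⟩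
          have : key a = w := by simpa using (List.of_mem_filter hmem)
          have := hhi w hw
          simp only [decide_eq_false_iff_not]
          omega
        · have : key a = key x := by simpa using (List.of_mem_filter ha)
          simp [this]
      · intro b hb
        have hbmem : b ∈ lo.flatMap (fun v => m.filter (fun y => key y == v)) :=
          List.mem_of_mem_head? hb
        rcases List.mem_flatMap.1 hbmem with ⟨w, hw, hmem⟩
        have : key b = w := by simpa using (List.of_mem_filter hmem)
        have := hlo w hw
        simp only [decide_eq_true_eq]
        omega
    rw [step, ih (m ++ [x]) (fun y hy => hc y (List.mem_cons_of_mem _ hy))]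
    simp

-- the bucket-filling fold: bucket v collects, in order, the numbers with index v
lemma pv_buckets_foldl (idx : Int → Int) :
    ∀ (l : List Int) (bs : List (List Int)),
      (∀ x ∈ l, 0 ≤ idx x ∧ idx x < (bs.length : Int)) →
      ∀ v : Int, 0 ≤ v → v < (bs.length : Int) →
      PySem.List.pyGetD
        (l.foldl (fun bs num =>
          PySem.List.pySetD bs (idx num) (PySem.List.pyGetD bs (idx num) [] ++ [num])) bs) v []
      = PySem.List.pyGetD bs v [] ++ l.filter (fun x => idx x == v) := by
  intro l
  induction l with
  | nil => intro bs _ v _ _; simp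
  | cons x l ih =>
    intro bs hb v hv0 hvl
    have hx := hb x List.mem_cons_self
    simp only [List.foldl_cons]
    have hlen : (PySem.List.pySetD bs (idx x)
        (PySem.List.pyGetD bs (idx x) [] ++ [x])).length = bs.length :=
      PySem.List.length_pySetD bs _ _
    rw [ih _ (by intro y hy; rw [hlen]; exact hb y (List.mem_cons_of_mem _ hy)) v hv0
          (by rw [hlen]; exact hvl)]
    rw [PySem.List.pySetD_of_nonneg bs _ hx.1]
    by_cases hvx : v = idx x
    · have : PySem.List.pyGetD (bs.set (idx x).toNat (PySem.List.pyGetD bs (idx x) [] ++ [x])) v []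
          = PySem.List.pyGetD bs (idx x) [] ++ [x] := by
        rw [PySem.List.pyGetD_of_nonneg _ _ hv0, hvx]
        have hlt : (idx x).toNat < bs.length := by omega
        simp [List.getD, List.getElem?_set_self hlt]
      rw [this, hvx]
      simp [List.append_assoc]
    · have : PySem.List.pyGetD (bs.set (idx x).toNat (PySem.List.pyGetD bs (idx x) [] ++ [x])) v []
          = PySem.List.pyGetD bs v [] := by
        rw [PySem.List.pyGetD_of_nonneg _ _ hv0, PySem.List.pyGetD_of_nonneg _ _ hv0]
        have hne : (idx x).toNat ≠ v.toNat := by omega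
        simp [List.getD, List.getElem?_set_ne hne]
      rw [this]
      have : (idx x == v) = false := by simp [Ne.symm hvx]
      simp [this]

lemma pv_core_eq (data : List (List Int)) (min_num max_num count : Int) :
    gap_method_py data min_num max_num count = gap_method_py_alt data min_num max_num count := by
  unfold gap_method_py gap_method_py_alt
  simp only []
  set n : Int := (data.length : Int) with hn
  set LS : PySem.Dict Int Int := pvLS data min_num max_num with hLS
  have hLSdef : (PySem.List.enumerate data 0).foldl (fun d p =>
      p.2.foldl (fun d num => if min_num ≤ num ∧ num ≤ max_num then d.insert num p.1 else d) d)
      PySem.Dict.empty = LS := rfl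
  rw [hLSdef]
  set rng : List Int := PySem.List.pyRange min_num (max_num + 1) 1 with hrng
  set gaps : PySem.Dict Int Int :=
    rng.foldl (fun g num => g.insert num (LS.getD num n)) PySem.Dict.empty with hgaps
  set vals : List Int := PySem.List.pyRange n (-1) (-1) with hvals
  -- facts about gaps
  have hkeys : gaps.keys = rng := by
    rw [hgaps, PySem.Dict.keys_foldl_insert rng (fun g num => LS.getD num n) PySem.Dict.empty]
    simp only [PySem.Dict.keys_empty]
    rw [PySem.Set.update_nil_left, PySem.Set.ofList_eq_self_of_nodup _ (PySem.List.nodup_pyRange_one _ _)]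
  have hnodupkeys : gaps.keys.Nodup := by rw [hkeys]; exact PySem.List.nodup_pyRange_one _ _
  have hitems : gaps.items = rng.map (fun a => (a, LS.getD a n)) := by
    rw [hgaps]
    have := PySem.Dict.items_foldl_insert_fresh rng (fun a => a) (fun a => LS.getD a n)
      PySem.Dict.empty (by intro a _; simp [PySem.Dict.contains_empty])
      (by simpa using PySem.List.nodup_pyRange_one min_num (max_num + 1))
    simpa using this
  have hgetD : ∀ x ∈ rng, gaps.getD x 0 = LS.getD x n := by
    intro x hx
    exact PySem.Dict.getD_of_mem_items gaps
      (by rw [hitems]; exact List.mem_map.2 ⟨x, hx, rfl⟩) hnodupkeys 0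
  -- vals is strictly decreasing and covers all the getD values
  have hvpair : vals.Pairwise (fun a b => b < a) := by
    rw [hvals, PySem.List.pyRange_neg_one_eq_reverse]
    rw [List.pairwise_reverse]
    exact PySem.List.pairwise_lt_pyRange_one (-1 + 1) (n + 1)
  have hbounds : ∀ x : Int, 0 ≤ LS.getD x n ∧ LS.getD x n ≤ n :=
    fun x => pvLS_getD_bounds data min_num max_num x
  have hcover : ∀ x ∈ rng, gaps.getD x 0 ∈ vals := by
    intro x hx
    rw [hgetD x hx, hvals, PySem.List.mem_pyRange_neg_one]
    have := hbounds x
    omega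
  -- A's sorted list, via the stability lemma on the decorated pairs
  have hA : ((PySem.List.sorted ((PySem.Dict.keys gaps).map (fun x => (gaps.getD x 0, x)))
        (fun p => p.1) true).map (fun p => p.2))
      = vals.flatMap (fun v => rng.filter (fun x => LS.getD x n == v)) := by
    rw [hkeys]
    set P : List (Int × Int) := rng.map (fun x => (gaps.getD x 0, x)) with hP
    have hPcover : ∀ p ∈ P, (fun q : Int × Int => q.1) p ∈ vals := by
      intro p hp
      rcases List.mem_map.1 hp with ⟨x, hx, rfl⟩
      exact hcover x hx
    have key := pv_sorted_rev_eq_flatMap (fun q : Int × Int => q.1) vals hvpair P [] hPcover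
    simp only [List.filter_nil] at key
    rw [show (List.flatMap (fun _ : Int => ([] : List (Int × Int))) vals) = [] from by simp] at key
    rw [PySem.List.sorted_rev_eq_foldl_insertBy, key, List.map_flatMap]
    refine List.flatMap_congr ?_
    intro v _
    rw [hP, List.nil_append, List.filter_map, List.map_map]
    have : ((fun p : Int × Int => p.2) ∘ fun x => (gaps.getD x 0, x)) = id := rfl
    rw [this, List.map_id]
    exact List.filter_congr (fun x hx => by simp only [Function.comp]; rw [hgetD x hx])
  -- B's ordered list equals the same flatMap
  have hBbuckets : ∀ v : Int, 0 ≤ v → v < n + 1 →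
      PySem.List.pyGetD
        (rng.foldl (fun bs num =>
          PySem.List.pySetD bs (LS.getD num n) (PySem.List.pyGetD bs (LS.getD num n) [] ++ [num]))
          (List.replicate (data.length + 1) [])) v []
      = rng.filter (fun x => LS.getD x n == v) := by
    intro v hv0 hv1
    rw [pv_buckets_foldl (fun num => LS.getD num n) rng (List.replicate (data.length + 1) [])
        (by intro x _; have := hbounds x; simp only [List.length_replicate]; push_cast; omega)
        v hv0 (by simp only [List.length_replicate]; push_cast; omega)]
    rw [PySem.List.pyGetD_of_nonneg _ _ hv0]
    have : v.toNat < (List.replicate (data.length + 1) ([] : List Int)).length := by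
      simp only [List.length_replicate]; omega
    simp [List.getD, List.getElem?_eq_getElem this]
  have hB : (vals.foldl (fun acc k => acc ++ PySem.List.pyGetD
        (rng.foldl (fun bs num =>
          PySem.List.pySetD bs (LS.getD num n) (PySem.List.pyGetD bs (LS.getD num n) [] ++ [num]))
          (List.replicate (data.length + 1) [])) k []) [])
      = vals.flatMap (fun v => rng.filter (fun x => LS.getD x n == v)) := by
    rw [PySem.List.foldl_append_eq_flatMap]
    simp only [List.nil_append]
    refine List.flatMap_congr ?_
    intro v hv
    rw [hvals, PySem.List.mem_pyRange_neg_one] at hv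
    exact hBbuckets v (by omega) (by omega)
  rw [hA, ← hB]

-- ===== VERDICT (by name: the statement is the Claim_ definition above) =====
theorem gap_method_py_spec : Claim_equal_gap_method_py := by
  intro data min_num max_num count _
  unfold Spec_gap_method_py
  exact pv_core_eq data min_num max_num count
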